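-- pv_equiv track=rewrite | github.com/zhaohaidao/3FS | deploy/data_placement/src/model/data_placement.py | find_params
-- ===== SOURCE A (Python) =====
-- def find_params(v, k, min_r=1, max_r=100, bibd_only=False):
--   if bibd_only: min_r = max(min_r, k)
--   for r in range(min_r, max_r):
--     if v * r % k == 0 and r * (k - 1) >= v - 1:
--       b = v * r // k
--       if not bibd_only or r * (k - 1) % (v - 1) == 0:
--         return v, b, r, k
--   raise ValueError(f"cannot find valid params: {v=}, {k=}")
-- ===== SOURCE B (Python) =====
-- def _gcd(a, b):
--     a, b = abs(a), abs(b)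
--     return a if b == 0 else _gcd(b, a % b)
--
-- def find_params(v, k, min_r=1, max_r=100, bibd_only=False):
--     # Only multiples of step = |k| // gcd(v, k) satisfy v*r % k == 0, so search
--     # the first qualifying r among those multiples with a generator expression.
--     lo = max(min_r, k) if bibd_only else min_r
--     step = abs(k) // _gcd(v, k)
--     start = lo + (-lo) % step  # least multiple of step that is >= lo
--     r = next((r for r in range(start, max_r, step)
--               if r * (k - 1) >= v - 1
--               and (not bibd_only or r * (k - 1) % (v - 1) == 0)), None)
--     if r is None:
--         raise ValueError(f"cannot find valid params: {v=}, {k=}")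
--     return v, v * r // k, r, k
-- ===== Notes on version B (the rewrite author's own statement) =====
-- stated objective: alternative
-- what changed: Instead of A's loop that tests v*r % k == 0 on every r in [min_r, max_r), B computes step = |k| // gcd(v,k) with a recursive Euclid (the divisibility holds exactly for multiples of step), starts at the least such multiple lo + (-lo) % step, and picks the first qualifying candidate with next() over a filtered generator on the stepped range, so the per-r modulo filter and the explicit loop both disappear.
import Mathlib
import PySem

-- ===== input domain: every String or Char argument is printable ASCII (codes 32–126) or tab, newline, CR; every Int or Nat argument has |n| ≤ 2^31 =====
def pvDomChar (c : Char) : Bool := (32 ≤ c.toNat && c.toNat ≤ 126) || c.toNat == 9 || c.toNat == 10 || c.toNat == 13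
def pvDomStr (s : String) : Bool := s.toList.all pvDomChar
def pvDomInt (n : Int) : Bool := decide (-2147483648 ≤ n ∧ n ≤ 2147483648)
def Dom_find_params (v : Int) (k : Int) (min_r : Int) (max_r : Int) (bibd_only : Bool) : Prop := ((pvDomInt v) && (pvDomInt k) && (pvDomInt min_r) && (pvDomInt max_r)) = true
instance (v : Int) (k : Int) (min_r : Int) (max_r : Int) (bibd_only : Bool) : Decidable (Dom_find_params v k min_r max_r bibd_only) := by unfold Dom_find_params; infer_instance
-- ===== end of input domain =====

-- B replaces A's per-r modulo filter by a first-match search (next over a generator) on the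
-- multiples of |k|/gcd(v,k) — the only r with v*r % k == 0; same first match, different traversal.

-- ===== PORT A =====
-- A's for-loop with early return, iterating r directly with a fuel bound for totality
-- (Python's range is lazy);
-- falling off the loop is Python's `raise ValueError` (excluded by Pre_)
def findA_go (v k : Int) (bibd_only : Bool) (max_r : Int) : Nat → Int → Int × Int × Int × Int
  | 0, _ => (0, 0, 0, 0)
  | fuel + 1, r =>
    if r < max_r then
      if PySem.Int.mod (v * r) k = 0 ∧ r * (k - 1) ≥ v - 1 then
        let b := PySem.Int.floordiv (v * r) k
        if bibd_only = false ∨ PySem.Int.mod (r * (k - 1)) (v - 1) = 0 then (v, b, r, k)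
        else findA_go v k bibd_only max_r fuel (r + 1)
      else findA_go v k bibd_only max_r fuel (r + 1)
    else (0, 0, 0, 0)

def find_params (v : Int) (k : Int) (min_r : Int) (max_r : Int) (bibd_only : Bool) : Int × Int × Int × Int :=
  let min_r' := if bibd_only then max min_r k else min_r
  findA_go v k bibd_only max_r (max_r - min_r').toNat min_r'

-- ===== PORT B =====
-- recursive Euclid, port of Source B's _gcd (both arguments already made non-negative)
def gcdRec (a b : Nat) : Nat :=
  if h : b = 0 then a else gcdRec b (a % b)
decreasing_by exact Nat.mod_lt _ (Nat.pos_of_ne_zero h)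

-- Source B's candidate predicate inside the generator expression
def candB (v k : Int) (bibd_only : Bool) (r : Int) : Bool :=
  decide (r * (k - 1) ≥ v - 1) &&
    (!bibd_only || decide (PySem.Int.mod (r * (k - 1)) (v - 1) = 0))

-- Source B: next((r for r in range(start, max_r, step) if …), None); None = ValueError (excluded by Pre_)
def find_params_alt (v : Int) (k : Int) (min_r : Int) (max_r : Int) (bibd_only : Bool) : Int × Int × Int × Int :=
  let lo := if bibd_only then max min_r k else min_r
  let step := PySem.Int.floordiv (k.natAbs : Int) ((gcdRec v.natAbs k.natAbs : Nat) : Int)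
  let start := lo + PySem.Int.mod (-lo) step
  match (PySem.List.pyRange start max_r step).find? (candB v k bibd_only) with
  | some r => (v, PySem.Int.floordiv (v * r) k, r, k)
  | none => (0, 0, 0, 0)

-- ===== PRECONDITION & SPEC =====
-- closed-form helpers for Pre_: least multiple of L that is ≥ x, and ceil(a/b), both for positive divisor
def pvCeilMul (L x : Int) : Int := -(PySem.Int.floordiv (-x) L) * L
def pvCeilDiv (a b : Int) : Int := -(PySem.Int.floordiv (-a) b)

-- Pre_ excludes exactly the inputs where the Python A raises: k = 0 (ZeroDivisionError in v*r % k if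
-- the range is nonempty, else ValueError), bibd_only with v = 1 (ZeroDivisionError in r*(k-1) % (v-1)
-- or ValueError; A never returns there), and ranges containing no valid r (ValueError).
def Pre_find_params (v : Int) (k : Int) (min_r : Int) (max_r : Int) (bibd_only : Bool) : Prop :=
  k ≠ 0 ∧ ¬(bibd_only = true ∧ v = 1) ∧
  (if 1 < k then
      pvCeilMul ((if bibd_only then Nat.lcm (k.natAbs / Nat.gcd k.natAbs v.natAbs)
          ((v-1).natAbs / Nat.gcd (v-1).natAbs (k-1).natAbs)
        else (k.natAbs / Nat.gcd k.natAbs v.natAbs) : Nat) : Int)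
        (max (if bibd_only then max min_r k else min_r) (pvCeilDiv (v-1) (k-1))) < max_r
    else
      pvCeilMul ((if bibd_only then Nat.lcm (k.natAbs / Nat.gcd k.natAbs v.natAbs)
          ((v-1).natAbs / Nat.gcd (v-1).natAbs (k-1).natAbs)
        else (k.natAbs / Nat.gcd k.natAbs v.natAbs) : Nat) : Int)
        (if bibd_only then max min_r k else min_r) < max_r ∧
      pvCeilMul ((if bibd_only then Nat.lcm (k.natAbs / Nat.gcd k.natAbs v.natAbs)
          ((v-1).natAbs / Nat.gcd (v-1).natAbs (k-1).natAbs)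
        else (k.natAbs / Nat.gcd k.natAbs v.natAbs) : Nat) : Int)
        (if bibd_only then max min_r k else min_r) * (k - 1) ≥ v - 1)
instance (v : Int) (k : Int) (min_r : Int) (max_r : Int) (bibd_only : Bool) : Decidable (Pre_find_params v k min_r max_r bibd_only) := by unfold Pre_find_params; infer_instance

def pvWitness_find_params : Int × Int × Int × Int × Bool := (6, 3, 1, 100, true)

def Spec_find_params (v : Int) (k : Int) (min_r : Int) (max_r : Int) (bibd_only : Bool) (out : Int × Int × Int × Int) : Prop := out = find_params_alt v k min_r max_r bibd_only
instance (v : Int) (k : Int) (min_r : Int) (max_r : Int) (bibd_only : Bool) (out : Int × Int × Int × Int) : Decidable (Spec_find_params v k min_r max_r bibd_only out) := by unfold Spec_find_params; infer_instance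

-- ===== CLAIM (what is proved, stated in full; the proofs are below) =====
def Claim_equal_find_params : Prop := ∀ (v : Int) (k : Int) (min_r : Int) (max_r : Int) (bibd_only : Bool), Dom_find_params v k min_r max_r bibd_only → Pre_find_params v k min_r max_r bibd_only → Spec_find_params v k min_r max_r bibd_only (find_params v k min_r max_r bibd_only)

-- ===== LEMMAS AND PROOFS =====

-- list formulation of A's loop (proof-side characterisation of findA_go)
def findA_loop (v k : Int) (bibd_only : Bool) : List Int → Int × Int × Int × Int
  | [] => (0, 0, 0, 0)
  | r :: rest =>
    if PySem.Int.mod (v * r) k = 0 ∧ r * (k - 1) ≥ v - 1 then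
      let b := PySem.Int.floordiv (v * r) k
      if bibd_only = false ∨ PySem.Int.mod (r * (k - 1)) (v - 1) = 0 then (v, b, r, k)
      else findA_loop v k bibd_only rest
    else findA_loop v k bibd_only rest

theorem findA_go_eq (v k : Int) (bibd : Bool) (max_r : Int) :
    ∀ (fuel : Nat) (r : Int), (max_r - r).toNat ≤ fuel →
      findA_go v k bibd max_r fuel r = findA_loop v k bibd (PySem.List.pyRange r max_r 1) := by
  intro fuel
  induction fuel with
  | zero =>
    intro r h
    rw [findA_go, PySem.List.pyRange_one_eq_nil (by omega), findA_loop]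
  | succ fuel ih =>
    intro r h
    by_cases hr : r < max_r
    · rw [findA_go, if_pos hr, PySem.List.pyRange_one_cons hr, findA_loop]
      rw [ih (r + 1) (by omega)]
    · rw [findA_go, if_neg hr, PySem.List.pyRange_one_eq_nil (by omega), findA_loop]

theorem pvCeilMul_spec (L x : Int) (hL : 0 < L) :
    L ∣ pvCeilMul L x ∧ x ≤ pvCeilMul L x ∧ ∀ r, L ∣ r → x ≤ r → pvCeilMul L x ≤ r := by
  have hbr : (-(PySem.Int.floordiv (-x) L) - 1) * L < x ∧ x ≤ -(PySem.Int.floordiv (-x) L) * L :=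
    (PySem.Int.neg_floordiv_neg_eq_iff_of_pos hL).mp rfl
  refine ⟨⟨-(PySem.Int.floordiv (-x) L), by rw [pvCeilMul]; ring⟩, hbr.2, ?_⟩
  rintro r ⟨t, ht⟩ hxr
  have h1 : (-(PySem.Int.floordiv (-x) L) - 1) * L < t * L := by
    calc (-(PySem.Int.floordiv (-x) L) - 1) * L < x := hbr.1
      _ ≤ r := hxr
      _ = t * L := by rw [ht]; ring
  have h2 : -(PySem.Int.floordiv (-x) L) - 1 < t := lt_of_mul_lt_mul_right h1 (le_of_lt hL)
  calc pvCeilMul L x = -(PySem.Int.floordiv (-x) L) * L := rfl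
    _ ≤ t * L := by nlinarith
    _ = r := by rw [ht]; ring

theorem pvCeilDiv_le_iff (a b r : Int) (hb : 0 < b) : pvCeilDiv a b ≤ r ↔ a ≤ r * b := by
  have hbr : (pvCeilDiv a b - 1) * b < a ∧ a ≤ pvCeilDiv a b * b :=
    (PySem.Int.neg_floordiv_neg_eq_iff_of_pos hb).mp rfl
  constructor
  · intro h; nlinarith [hbr.2]
  · intro h
    nlinarith [hbr.1]

theorem gcdRec_eq (b a : Nat) : gcdRec a b = Nat.gcd b a := by
  induction b using Nat.strong_induction_on generalizing a with
  | _ b ih =>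
    rw [gcdRec]
    by_cases h : b = 0
    · simp [h]
    · rw [dif_neg h, Nat.gcd_rec b a]
      exact ih (a % b) (Nat.mod_lt _ (Nat.pos_of_ne_zero h)) b

-- Nat divisibility core
theorem nat_dvd_mul_iff (n m x : Nat) (hn : 0 < n) :
    n ∣ m * x ↔ (n / Nat.gcd n m) ∣ x := by
  set g := Nat.gcd n m with hg
  have hgpos : 0 < g := Nat.gcd_pos_of_pos_left m hn
  have hn' : n = (n / g) * g := (Nat.div_mul_cancel (Nat.gcd_dvd_left n m)).symm
  have hm' : m = (m / g) * g := (Nat.div_mul_cancel (Nat.gcd_dvd_right n m)).symm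
  have hco : Nat.Coprime (n / g) (m / g) := Nat.coprime_div_gcd_div_gcd hgpos
  constructor
  · intro h
    have h2 : (n / g) * g ∣ ((m / g) * x) * g := by
      rw [← hn']; rw [hm'] at h; ring_nf at h ⊢
      exact h.trans (dvd_of_eq (by ring))
    have h3 : (n / g) ∣ (m / g) * x := (Nat.mul_dvd_mul_iff_right hgpos).mp h2
    exact (Nat.Coprime.dvd_of_dvd_mul_left hco h3)
  · intro h
    rw [hn', hm']
    calc (n / g) * g ∣ x * g := Nat.mul_dvd_mul_right h g
      _ ∣ ((m / g) * g) * x := by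
          rw [show ((m / g) * g) * x = (m / g) * (x * g) by ring]
          exact Dvd.dvd.mul_left dvd_rfl _

theorem int_step_dvd (v k r : Int) (hk : k ≠ 0) :
    k ∣ v * r ↔ ((k.natAbs / Nat.gcd k.natAbs v.natAbs : Nat) : Int) ∣ r := by
  have hn : 0 < k.natAbs := Int.natAbs_pos.mpr hk
  rw [← Int.natAbs_dvd_natAbs, Int.natAbs_mul]
  rw [nat_dvd_mul_iff k.natAbs v.natAbs r.natAbs hn, Int.natCast_dvd]

theorem pairwise_pyRange_pos (a b s : Int) (hs : 0 < s) :
    (PySem.List.pyRange a b s).Pairwise (· < ·) := by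
  rw [PySem.List.pyRange_of_pos a b hs]
  refine List.Pairwise.map _ ?_ List.pairwise_lt_range
  intro x y hxy
  have : (x : Int) < (y : Int) := by exact_mod_cast hxy
  nlinarith

theorem findA_loop_first (v k : Int) (bibd : Bool) (l : List Int) (r0 : Int)
    (hp : l.Pairwise (· < ·)) (hmem : r0 ∈ l)
    (h1 : PySem.Int.mod (v * r0) k = 0) (h2 : r0 * (k - 1) ≥ v - 1)
    (h3 : bibd = false ∨ PySem.Int.mod (r0 * (k - 1)) (v - 1) = 0)
    (hmin : ∀ y ∈ l, (PySem.Int.mod (v * y) k = 0 ∧ y * (k - 1) ≥ v - 1 ∧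
        (bibd = false ∨ PySem.Int.mod (y * (k - 1)) (v - 1) = 0)) → r0 ≤ y) :
    findA_loop v k bibd l = (v, PySem.Int.floordiv (v * r0) k, r0, k) := by
  induction l with
  | nil => cases hmem
  | cons h t ih =>
    by_cases he : h = r0
    · subst he
      rw [findA_loop, if_pos ⟨h1, h2⟩, if_pos h3]
    · have hmem' : r0 ∈ t := by
        rcases List.mem_cons.mp hmem with h' | h'
        · exact absurd h'.symm he
        · exact h'
      have hlt : h < r0 := (List.pairwise_cons.mp hp).1 r0 hmem'
      have hnP : ¬(PySem.Int.mod (v * h) k = 0 ∧ h * (k - 1) ≥ v - 1 ∧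
          (bibd = false ∨ PySem.Int.mod (h * (k - 1)) (v - 1) = 0)) := by
        intro hP
        exact absurd (hmin h (List.mem_cons_self) hP) (by omega)
      have ih' := ih (List.pairwise_cons.mp hp).2 hmem'
        (fun y hy => hmin y (List.mem_cons_of_mem _ hy))
      rw [findA_loop]
      by_cases hc1 : PySem.Int.mod (v * h) k = 0 ∧ h * (k - 1) ≥ v - 1
      · rw [if_pos hc1]
        have hc2 : ¬(bibd = false ∨ PySem.Int.mod (h * (k - 1)) (v - 1) = 0) := by
          intro hc2; exact hnP ⟨hc1.1, hc1.2, hc2⟩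
        rw [if_neg hc2]; exact ih'
      · rw [if_neg hc1]; exact ih'

-- find? on a strictly increasing list returns the least element satisfying the predicate
theorem find?_least (p : Int → Bool) (l : List Int) (r0 : Int)
    (hp : l.Pairwise (· < ·)) (hmem : r0 ∈ l) (h : p r0 = true)
    (hmin : ∀ y ∈ l, p y = true → r0 ≤ y) : l.find? p = some r0 := by
  induction l with
  | nil => cases hmem
  | cons a t ih =>
    by_cases he : a = r0
    · subst he
      simp [List.find?, h]
    · have hmem' : r0 ∈ t := by
        rcases List.mem_cons.mp hmem with h' | h'
        · exact absurd h'.symm he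
        · exact h'
      have hlt : a < r0 := (List.pairwise_cons.mp hp).1 r0 hmem'
      have hpa : p a = false := by
        cases hpa : p a
        · rfl
        · exact absurd (hmin a List.mem_cons_self hpa) (by omega)
      simp only [List.find?, hpa]
      exact ih (List.pairwise_cons.mp hp).2 hmem'
        (fun y hy => hmin y (List.mem_cons_of_mem _ hy))

theorem candB_iff (v k : Int) (bibd : Bool) (r : Int) :
    candB v k bibd r = true ↔
      (r * (k - 1) ≥ v - 1 ∧ (bibd = false ∨ PySem.Int.mod (r * (k - 1)) (v - 1) = 0)) := by
  cases bibd <;> simp [candB]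

theorem pre_exists_iff (v k min_r max_r : Int) (bibd : Bool)
    (hk : k ≠ 0) (hv1 : ¬(bibd = true ∧ v = 1)) :
    (if 1 < k then
        pvCeilMul ((if bibd then Nat.lcm (k.natAbs / Nat.gcd k.natAbs v.natAbs)
            ((v-1).natAbs / Nat.gcd (v-1).natAbs (k-1).natAbs)
          else (k.natAbs / Nat.gcd k.natAbs v.natAbs) : Nat) : Int)
          (max (if bibd then max min_r k else min_r) (pvCeilDiv (v-1) (k-1))) < max_r
      else
        pvCeilMul ((if bibd then Nat.lcm (k.natAbs / Nat.gcd k.natAbs v.natAbs)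
            ((v-1).natAbs / Nat.gcd (v-1).natAbs (k-1).natAbs)
          else (k.natAbs / Nat.gcd k.natAbs v.natAbs) : Nat) : Int)
          (if bibd then max min_r k else min_r) < max_r ∧
        pvCeilMul ((if bibd then Nat.lcm (k.natAbs / Nat.gcd k.natAbs v.natAbs)
            ((v-1).natAbs / Nat.gcd (v-1).natAbs (k-1).natAbs)
          else (k.natAbs / Nat.gcd k.natAbs v.natAbs) : Nat) : Int)
          (if bibd then max min_r k else min_r) * (k - 1) ≥ v - 1)
    ↔ ∃ r ∈ PySem.List.pyRange (if bibd then max min_r k else min_r) max_r 1,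
        PySem.Int.mod (v * r) k = 0 ∧ r * (k - 1) ≥ v - 1 ∧
          (bibd = false ∨ PySem.Int.mod (r * (k - 1)) (v - 1) = 0) := by
  set lo := if bibd then max min_r k else min_r with hlo
  set stepN : Nat := k.natAbs / Nat.gcd k.natAbs v.natAbs with hstepN
  set qN : Nat := (v-1).natAbs / Nat.gcd (v-1).natAbs (k-1).natAbs with hqN
  set LN : Nat := if bibd then Nat.lcm stepN qN else stepN with hLN
  set L : Int := (LN : Int) with hL
  have hgpos : 0 < Nat.gcd k.natAbs v.natAbs :=
    Nat.gcd_pos_of_pos_left _ (Int.natAbs_pos.mpr hk)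
  have hstepNpos : 0 < stepN :=
    Nat.div_pos (Nat.le_of_dvd (Int.natAbs_pos.mpr hk) (Nat.gcd_dvd_left _ _)) hgpos
  have hLNpos : 0 < LN := by
    rw [hLN]
    by_cases hb : bibd = true
    · simp only [hb, if_pos]
      rcases Nat.eq_zero_or_pos qN with h0 | hq
      · exfalso
        have hv : v ≠ 1 := fun hv => hv1 ⟨hb, hv⟩
        have : (v-1).natAbs ≠ 0 := by
          simp only [ne_eq, Int.natAbs_eq_zero]; omega
        have hg2 : 0 < Nat.gcd (v-1).natAbs (k-1).natAbs :=
          Nat.gcd_pos_of_pos_left _ (Nat.pos_of_ne_zero this)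
        have := Nat.div_pos (Nat.le_of_dvd (Nat.pos_of_ne_zero this) (Nat.gcd_dvd_left _ _)) hg2
        omega
      · exact Nat.pos_of_ne_zero (fun h => by
          rcases Nat.lcm_eq_zero_iff.mp h with h | h <;> omega)
    · simp only [Bool.not_eq_true] at *
      simpa [hb] using hstepNpos
  have hLpos : (0:Int) < L := by rw [hL]; exact_mod_cast hLNpos
  -- characterise the divisibility part of the loop condition
  have hC : ∀ r : Int, (PySem.Int.mod (v * r) k = 0 ∧
      (bibd = false ∨ PySem.Int.mod (r * (k - 1)) (v - 1) = 0)) ↔ L ∣ r := by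
    intro r
    rw [PySem.Int.mod_eq_zero_iff_dvd, int_step_dvd v k r hk, hL, hLN]
    by_cases hb : bibd = true
    · have hv : v - 1 ≠ 0 := fun hv => hv1 ⟨hb, by omega⟩
      rw [PySem.Int.mod_eq_zero_iff_dvd, mul_comm r (k-1), int_step_dvd (k-1) (v-1) r hv]
      simp only [hb, if_true, Bool.true_eq_false, false_or]
      constructor
      · rintro ⟨h1, h2⟩
        exact Int.natCast_dvd.mpr (Nat.lcm_dvd (Int.natCast_dvd.mp h1) (Int.natCast_dvd.mp h2))
      · intro h
        exact ⟨(Int.natCast_dvd_natCast.mpr (Nat.dvd_lcm_left _ _)).trans h,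
               (Int.natCast_dvd_natCast.mpr (Nat.dvd_lcm_right _ _)).trans h⟩
    · simp only [Bool.not_eq_true] at hb
      simp only [hb, Bool.false_eq_true, if_false, true_or, and_true]
      exact Iff.rfl
  -- rewrite the existential
  have hEx : (∃ r ∈ PySem.List.pyRange lo max_r 1,
      PySem.Int.mod (v * r) k = 0 ∧ r * (k - 1) ≥ v - 1 ∧
        (bibd = false ∨ PySem.Int.mod (r * (k - 1)) (v - 1) = 0)) ↔
      (∃ r : Int, lo ≤ r ∧ r < max_r ∧ L ∣ r ∧ r * (k - 1) ≥ v - 1) := by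
    constructor
    · rintro ⟨r, hmem, h1, h2, h3⟩
      obtain ⟨ha, hbnd⟩ := (PySem.List.mem_pyRange_one).mp hmem
      exact ⟨r, ha, hbnd, (hC r).mp ⟨h1, h3⟩, h2⟩
    · rintro ⟨r, ha, hbnd, hdvd, hineq⟩
      obtain ⟨h1, h3⟩ := (hC r).mpr hdvd
      exact ⟨r, (PySem.List.mem_pyRange_one).mpr ⟨ha, hbnd⟩, h1, hineq, h3⟩
  rw [hEx]
  by_cases hk1 : 1 < k
  · rw [if_pos hk1]
    set c0 := pvCeilDiv (v-1) (k-1) with hc0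
    have hI : ∀ r : Int, r * (k - 1) ≥ v - 1 ↔ c0 ≤ r := by
      intro r
      rw [hc0, pvCeilDiv_le_iff (v-1) (k-1) r (by omega)]
    obtain ⟨hmdvd, hmle, hmmin⟩ := pvCeilMul_spec L (max lo c0) hLpos
    constructor
    · intro hm
      exact ⟨pvCeilMul L (max lo c0), le_trans (le_max_left _ _) hmle, hm, hmdvd,
        (hI _).mpr (le_trans (le_max_right _ _) hmle)⟩
    · rintro ⟨r, ha, hbnd, hdvd, hineq⟩
      exact lt_of_le_of_lt (hmmin r hdvd (max_le ha ((hI r).mp hineq))) hbnd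
  · rw [if_neg hk1]
    have hk1' : k - 1 ≤ 0 := by omega
    obtain ⟨hsdvd, hsle, hsmin⟩ := pvCeilMul_spec L lo hLpos
    constructor
    · rintro ⟨hm, hineq⟩
      exact ⟨pvCeilMul L lo, hsle, hm, hsdvd, hineq⟩
    · rintro ⟨r, ha, hbnd, hdvd, hineq⟩
      have hsr : pvCeilMul L lo ≤ r := hsmin r hdvd ha
      exact ⟨lt_of_le_of_lt hsr hbnd, by nlinarith⟩

theorem find_params_eq_alt_of_valid (v k min_r max_r : Int) (bibd : Bool) (hk : k ≠ 0)
    (hex : ∃ r ∈ PySem.List.pyRange (if bibd then max min_r k else min_r) max_r 1,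
      PySem.Int.mod (v * r) k = 0 ∧ r * (k - 1) ≥ v - 1 ∧
        (bibd = false ∨ PySem.Int.mod (r * (k - 1)) (v - 1) = 0)) :
    find_params v k min_r max_r bibd = find_params_alt v k min_r max_r bibd := by
  set lo := if bibd then max min_r k else min_r with hlo
  -- the step
  have hg : (gcdRec v.natAbs k.natAbs : Nat) = Nat.gcd k.natAbs v.natAbs := gcdRec_eq _ _
  set stepN : Nat := k.natAbs / Nat.gcd k.natAbs v.natAbs with hstepN
  have hstep_eq : PySem.Int.floordiv (k.natAbs : Int) ((gcdRec v.natAbs k.natAbs : Nat) : Int)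
      = (stepN : Int) := by
    rw [hg, PySem.Int.floordiv_natCast]
  have hgpos : 0 < Nat.gcd k.natAbs v.natAbs :=
    Nat.gcd_pos_of_pos_left _ (Int.natAbs_pos.mpr hk)
  have hstepNpos : 0 < stepN :=
    Nat.div_pos (Nat.le_of_dvd (Int.natAbs_pos.mpr hk) (Nat.gcd_dvd_left _ _)) hgpos
  have hstep_pos : (0 : Int) < (stepN : Int) := by exact_mod_cast hstepNpos
  -- the divisibility characterisation
  have hmodiff : ∀ r : Int, PySem.Int.mod (v * r) k = 0 ↔ (stepN : Int) ∣ r := by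
    intro r
    rw [PySem.Int.mod_eq_zero_iff_dvd]
    exact int_step_dvd v k r hk
  -- the start: lo + (-lo) % step is the ceiling multiple pvCeilMul stepN lo
  have hmadd := PySem.Int.floordiv_mul_add_mod (-lo) (stepN : Int)
  set start : Int := lo + PySem.Int.mod (-lo) (stepN : Int) with hstart
  have hstart_ceil : start = pvCeilMul (stepN : Int) lo := by
    rw [hstart, pvCeilMul]; linarith [hmadd]
  obtain ⟨hstart_dvd, hstart_ge, hstart_min⟩ :=
    (hstart_ceil ▸ pvCeilMul_spec (stepN : Int) lo hstep_pos)
  -- least valid r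
  obtain ⟨lb, ⟨hlbmem, hlbP⟩, hlbmin⟩ := Int.exists_least_of_bdd
    (P := fun r => r ∈ PySem.List.pyRange lo max_r 1 ∧
      (PySem.Int.mod (v * r) k = 0 ∧ r * (k - 1) ≥ v - 1 ∧
        (bibd = false ∨ PySem.Int.mod (r * (k - 1)) (v - 1) = 0)))
    ⟨lo, fun z hz => ((PySem.List.mem_pyRange_one).mp hz.1).1⟩
    (by obtain ⟨r, hr, hP⟩ := hex; exact ⟨r, hr, hP⟩)
  obtain ⟨hmod0, hineq0, hbibd0⟩ := hlbP
  have hlb_range := (PySem.List.mem_pyRange_one).mp hlbmem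
  -- A side
  have hA : find_params v k min_r max_r bibd = (v, PySem.Int.floordiv (v * lb) k, lb, k) := by
    show findA_go v k bibd max_r (max_r - lo).toNat lo = _
    rw [findA_go_eq v k bibd max_r _ _ (le_refl _)]
    exact findA_loop_first v k bibd _ lb (PySem.List.pairwise_lt_pyRange_one lo max_r)
      hlbmem hmod0 hineq0 hbibd0
      (fun y hy hP => hlbmin y ⟨hy, hP⟩)
  -- B side
  have hlb_dvd : (stepN : Int) ∣ lb := (hmodiff lb).mp hmod0
  have hlb_memB : lb ∈ PySem.List.pyRange start max_r (stepN : Int) := by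
    rw [PySem.List.mem_pyRange_iff_of_pos hstep_pos]
    exact ⟨hstart_min lb hlb_dvd hlb_range.1, hlb_range.2,
      (Int.dvd_sub hlb_dvd hstart_dvd)⟩
  have hfind : (PySem.List.pyRange start max_r (stepN : Int)).find? (candB v k bibd)
      = some lb := by
    refine find?_least _ _ lb (pairwise_pyRange_pos _ _ _ hstep_pos) hlb_memB
      ((candB_iff v k bibd lb).mpr ⟨hineq0, hbibd0⟩) ?_
    intro y hy hQ
    obtain ⟨hQ1, hQ2⟩ := (candB_iff v k bibd y).mp hQ
    rw [PySem.List.mem_pyRange_iff_of_pos hstep_pos] at hy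
    obtain ⟨hsy, hylt, hdvd⟩ := hy
    have hy_dvd : (stepN : Int) ∣ y := by
      have h := Int.dvd_add hdvd hstart_dvd
      rwa [sub_add_cancel] at h
    have hy_lo : lo ≤ y := le_trans hstart_ge hsy
    exact hlbmin y ⟨(PySem.List.mem_pyRange_one).mpr ⟨hy_lo, hylt⟩,
      (hmodiff y).mpr hy_dvd, hQ1, hQ2⟩
  have hB : find_params_alt v k min_r max_r bibd = (v, PySem.Int.floordiv (v * lb) k, lb, k) := by
    show (match (PySem.List.pyRange
        (lo + PySem.Int.mod (-lo)
          (PySem.Int.floordiv (k.natAbs : Int) ((gcdRec v.natAbs k.natAbs : Nat) : Int)))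
        max_r
        (PySem.Int.floordiv (k.natAbs : Int) ((gcdRec v.natAbs k.natAbs : Nat) : Int))).find?
        (candB v k bibd) with
      | some r => (v, PySem.Int.floordiv (v * r) k, r, k)
      | none => ((0:Int), (0:Int), (0:Int), (0:Int))) = _
    rw [hstep_eq]
    rw [show lo + PySem.Int.mod (-lo) (stepN : Int) = start from rfl, hfind]
  rw [hA, hB]

-- ===== VERDICT (by name: the statement is the Claim_ definition above) =====
theorem find_params_spec : Claim_equal_find_params := by
  intro v k min_r max_r bibd_only _ hpre
  obtain ⟨hk, hv1, hcond⟩ := hpre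
  exact find_params_eq_alt_of_valid v k min_r max_r bibd_only hk
    ((pre_exists_iff v k min_r max_r bibd_only hk hv1).mp hcond)
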